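-- pv_equiv track=rewrite | github.com/CubedCard/adventofcode | 2025/day-3/solution.py | bestSubsequence
-- ===== SOURCE A (Python) =====
-- def bestSubsequence(bank, k):
--     to_remove = len(bank) - k
--     stack = []
--
--     for digit in bank:
--         while to_remove > 0 and stack and stack[-1] < digit:
--             stack.pop()
--             to_remove -= 1
--         stack.append(digit)
--
--     return "".join(stack[:k])
-- ===== SOURCE B (Python) =====
-- def bestSubsequence(bank, k):
--     m = min(k, len(bank))
--     res = []
--     while m > 0:
--         best = 0
--         for j in range(1, len(bank) - m + 1):
--             if bank[j] > bank[best]: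
--                 best = j
--         res.append(bank[best])
--         bank = bank[best + 1:]
--         m -= 1
--     return "".join(res)
-- ===== Notes on version B (the rewrite author's own statement) =====
-- stated objective: alternative
-- what changed: Replaces the monotonic-stack greedy (one pass with a pop budget) by a recursive windowed selection: for each output position pick the leftmost maximal digit in the range that still leaves enough digits, then recurse on the suffix.
-- outside the precondition, e.g. on bestSubsequence('21', -1): A returns '2', B returns ''
import Mathlib
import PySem

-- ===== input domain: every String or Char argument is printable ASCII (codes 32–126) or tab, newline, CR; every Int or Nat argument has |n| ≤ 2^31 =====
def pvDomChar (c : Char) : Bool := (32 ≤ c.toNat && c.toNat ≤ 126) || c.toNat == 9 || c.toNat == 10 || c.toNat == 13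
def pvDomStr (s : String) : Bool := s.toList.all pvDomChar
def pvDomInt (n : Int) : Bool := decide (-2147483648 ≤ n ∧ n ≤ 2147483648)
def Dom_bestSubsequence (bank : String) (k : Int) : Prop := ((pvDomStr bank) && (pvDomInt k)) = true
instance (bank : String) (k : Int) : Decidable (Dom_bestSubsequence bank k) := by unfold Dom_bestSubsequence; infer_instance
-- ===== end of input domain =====

-- B re-implements the greedy stack by recursive windowed max-selection; equal return values for k ≥ 0.

-- ===== PORT A =====
-- the inner `while to_remove > 0 and stack and stack[-1] < digit: stack.pop(); to_remove -= 1`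
-- (stack is represented top-at-head, so append = cons and the final join reverses it back)
def pvA_while (d : Char) : List Char → Int → List Char × Int
  | [], r => ([], r)
  | t :: rest, r => if r > 0 ∧ t < d then pvA_while d rest (r - 1) else (t :: rest, r)

-- one iteration of the `for digit in bank` loop: run the while, then stack.append(digit)
def pvA_step (st : List Char × Int) (d : Char) : List Char × Int :=
  (d :: (pvA_while d st.1 st.2).1, (pvA_while d st.1 st.2).2)

def pvA_run (cs : List Char) (st : List Char × Int) : List Char × Int :=
  cs.foldl pvA_step st

def bestSubsequence (bank : String) (k : Int) : String :=
  let cs := bank.toList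
  let p := pvA_run cs ([], (cs.length : Int) - k)   -- to_remove = len(bank) - k
  String.ofList (PySem.List.slice p.1.reverse none (some k))   -- "".join(stack[:k])

-- ===== PORT B =====
-- inner for loop of _pick: leftmost index of the maximal digit among cs[0..cnt]
def pvB_best (cs : List Char) (cnt : Nat) : Nat :=
  (List.range' 1 cnt).foldl (fun b j => if cs.getD b ' ' < cs.getD j ' ' then j else b) 0
  -- cs.getD j ' ' ports bank[j]; every index produced is in range, so the default is never used

-- the `while m > 0` loop of B, with `res` the accumulator list
def pvB_pick (cs : List Char) (m : Int) (res : List Char) : List Char :=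
  if m ≤ 0 then res
  else
    let best := pvB_best cs (cs.length - m.toNat)   -- range(1, len(bank) - m + 1)
    pvB_pick (cs.drop (best + 1)) (m - 1) (res ++ [cs.getD best ' '])
termination_by m.toNat
decreasing_by omega

def bestSubsequence_alt (bank : String) (k : Int) : String :=
  String.ofList (pvB_pick bank.toList (min k (bank.toList.length : Int)) [])

-- ===== PRECONDITION & SPEC =====
-- Pre_ excludes negative k, outside the natural domain of the task (a count of digits to keep);
-- there A's negative-slice truncation stack[:k] is an artefact and B naturally returns "".
def Pre_bestSubsequence (_bank : String) (k : Int) : Prop := 0 ≤ k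
instance (bank : String) (k : Int) : Decidable (Pre_bestSubsequence bank k) := by
  unfold Pre_bestSubsequence; infer_instance

def pvWitness_bestSubsequence : String × Int := ("329914", 3)

def Spec_bestSubsequence (bank : String) (k : Int) (out : String) : Prop := out = bestSubsequence_alt bank k
instance (bank : String) (k : Int) (out : String) : Decidable (Spec_bestSubsequence bank k out) := by unfold Spec_bestSubsequence; infer_instance

-- ===== CLAIM (what is proved, stated in full; the proofs are below) =====
def Claim_equal_bestSubsequence : Prop := ∀ (bank : String) (k : Int), Dom_bestSubsequence bank k → Pre_bestSubsequence bank k → Spec_bestSubsequence bank k (bestSubsequence bank k)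

-- ===== LEMMAS AND PROOFS =====

-- the while loop pops some prefix of the stack, one budget unit per pop
lemma pvA_while_spec (d : Char) (s : List Char) (r : Int) :
    ∃ p : Nat, p ≤ s.length ∧ pvA_while d s r = (s.drop p, r - p) := by
  induction s generalizing r with
  | nil => exact ⟨0, by simp [pvA_while]⟩
  | cons t rest ih =>
    by_cases hc : r > 0 ∧ t < d
    · obtain ⟨p, hp, he⟩ := ih (r - 1)
      exact ⟨p + 1, by simpa using hp, by simp [pvA_while, hc, he]; ring⟩
    · exact ⟨0, by simp, by simp [pvA_while, hc]⟩

-- a stack element below the stopping point is inert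
lemma pvA_while_append (d : Char) (s : List Char) (r : Int) (c t : Char) (s' : List Char) (r' : Int)
    (h : pvA_while d s r = (t :: s', r')) :
    pvA_while d (s ++ [c]) r = (t :: (s' ++ [c]), r') := by
  induction s generalizing r with
  | nil => simp [pvA_while] at h
  | cons a rest ih =>
    by_cases hc : r > 0 ∧ a < d
    · simp only [pvA_while, hc, List.cons_append] at h ⊢
      exact ih _ h
    · simp only [pvA_while, hc, if_false, List.cons_append] at h ⊢
      obtain ⟨h1, h2⟩ := Prod.mk.injEq .. ▸ h
      cases h1; simp [h2]

lemma pvA_while_empty (d : Char) (s : List Char) (r : Int) (c : Char) (r' : Int)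
    (h : pvA_while d s r = ([], r')) :
    pvA_while d (s ++ [c]) r = if r' > 0 ∧ c < d then ([], r' - 1) else ([c], r') := by
  induction s generalizing r with
  | nil =>
    simp only [pvA_while, Prod.mk.injEq] at h
    simp [pvA_while, h.2]
  | cons a rest ih =>
    by_cases hc : r > 0 ∧ a < d
    · simp only [pvA_while, hc, List.cons_append] at h ⊢
      exact ih _ h
    · simp [pvA_while, hc] at h

-- with enough budget, a digit larger than everything on the stack pops it all
lemma pvA_while_popAll (d : Char) (s : List Char) (r : Int)
    (hlt : ∀ x ∈ s, x < d) (hr : (s.length : Int) ≤ r) :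
    pvA_while d s r = ([], r - s.length) := by
  induction s generalizing r with
  | nil => simp [pvA_while]
  | cons a rest ih =>
    have h1 : r > 0 := by simp at hr; omega
    have h2 : a < d := hlt a (by simp)
    have := ih (r - 1) (fun x hx => hlt x (by simp [hx])) (by simp at hr ⊢; omega)
    simp only [pvA_while, h1, h2, and_self, if_true, this]
    congr 1
    simp; ring

lemma pvA_run_append (xs ys : List Char) (st : List Char × Int) :
    pvA_run (xs ++ ys) st = pvA_run ys (pvA_run xs st) := by
  simp [pvA_run]

-- running the loop spends one budget unit per net stack shrink, and the stack holds old/seen digits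
lemma pvA_run_inv (cs : List Char) (s : List Char) (r : Int) :
    ∃ p : Nat, (pvA_run cs (s, r)).2 = r - p ∧
      (pvA_run cs (s, r)).1.length + p = s.length + cs.length ∧
      ∀ x ∈ (pvA_run cs (s, r)).1, x ∈ s ∨ x ∈ cs := by
  induction cs generalizing s r with
  | nil => exact ⟨0, by simp [pvA_run], by simp [pvA_run], by simp [pvA_run]⟩
  | cons d ys ih =>
    obtain ⟨q, hq, hw⟩ := pvA_while_spec d s r
    have hrun : pvA_run (d :: ys) (s, r) = pvA_run ys (d :: s.drop q, r - q) := by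
      simp [pvA_run, pvA_step, hw]
    obtain ⟨p, h1, h2, h3⟩ := ih (d :: s.drop q) (r - q)
    refine ⟨p + q, ?_, ?_, ?_⟩
    · rw [hrun, h1]; push_cast; ring
    · rw [hrun]
      have := List.length_drop (l := s) (i := q)
      simp at h2 ⊢; omega
    · rw [hrun]
      intro x hx
      rcases h3 x hx with h | h
      · rcases List.mem_cons.mp h with h' | h'
        · right; simp [h']
        · left; exact List.mem_of_mem_drop h'
      · right; simp [h]

-- ramp-up: consuming pre ++ [c] with all of pre smaller than c leaves exactly [c]
lemma pvA_run_ramp (pre : List Char) (c : Char) (r : Int)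
    (hlt : ∀ x ∈ pre, x < c) (hr : (pre.length : Int) ≤ r) :
    pvA_run (pre ++ [c]) ([], r) = ([c], r - pre.length) := by
  rw [pvA_run_append]
  obtain ⟨p, h1, h2, h3⟩ := pvA_run_inv pre [] r
  obtain ⟨s', b, hsb⟩ : ∃ s' b, pvA_run pre ([], r) = (s', b) :=
    ⟨(pvA_run pre ([], r)).1, (pvA_run pre ([], r)).2, rfl⟩
  rw [hsb] at h1 h2 h3 ⊢
  simp only at h1 h2 h3
  have hall : ∀ x ∈ s', x < c := by
    intro x hx
    rcases h3 x hx with h | h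
    · simp at h
    · exact hlt x h
  have hlen : (s'.length : Int) ≤ b := by
    simp at h2; omega
  have hpop := pvA_while_popAll c s' b hall hlen
  have hrc : pvA_run [c] (s', b) = ([c], b - s'.length) := by
    simp [pvA_run, pvA_step, hpop]
  rw [hrc]
  have : (s'.length : Int) = (pre.length : Int) - p := by simp at h2; omega
  rw [this, h1]
  congr 1
  ring

lemma pvA_run_bottom (ys : List Char) (s : List Char) (b : Int) (c : Char)
    (hy : ∀ i : Nat, (i : Int) < b - s.length → ∀ h : i < ys.length, ys[i] ≤ c) :
    pvA_run ys (s ++ [c], b) = ((pvA_run ys (s, b)).1 ++ [c], (pvA_run ys (s, b)).2) := by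
  induction ys generalizing s b with
  | nil => simp [pvA_run]
  | cons d ys ih =>
    obtain ⟨p, hp, hw⟩ := pvA_while_spec d s b
    have hwc : pvA_while d (s ++ [c]) b = (s.drop p ++ [c], b - p) := by
      cases hdp : s.drop p with
      | nil =>
        rw [hdp] at hw
        have hps : p = s.length := by
          have := List.length_drop (l := s) (i := p)
          rw [hdp] at this; simp at this; omega
        have he := pvA_while_empty d s b c _ hw
        by_cases hbp : b - (p : Int) > 0 ∧ c < d
        · exfalso
          have h0 : ((0 : Nat) : Int) < b - s.length := by
            push_cast; rw [← hps]; exact_mod_cast hbp.1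
          have hd := hy 0 h0 (by simp)
          simp at hd
          exact absurd hbp.2 (not_lt.mpr hd)
        · rw [he, if_neg hbp]; simp
      | cons t s'' =>
        rw [hdp] at hw
        have h2 := pvA_while_append d s b c t s'' _ hw
        rw [h2]; simp
    have hstep1 : pvA_run (d :: ys) (s ++ [c], b) = pvA_run ys ((d :: s.drop p) ++ [c], b - p) := by
      simp [pvA_run, pvA_step, hwc]
    have hstep2 : pvA_run (d :: ys) (s, b) = pvA_run ys (d :: s.drop p, b - p) := by
      simp [pvA_run, pvA_step, hw]
    rw [hstep1, hstep2]
    apply ih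
    intro i hi h
    have hlen : ((d :: s.drop p).length : Int) = (s.length : Int) - p + 1 := by
      simp [List.length_drop]; omega
    have h1 : ((i + 1 : Nat) : Int) < b - s.length := by
      rw [hlen] at hi; push_cast at hi ⊢; omega
    have := hy (i + 1) h1 (by simp; omega)
    simpa using this

-- with no budget nothing is ever popped
lemma pvA_run_nopop (cs : List Char) (s : List Char) (r : Int) (hr : r ≤ 0) :
    pvA_run cs (s, r) = (cs.reverse ++ s, r) := by
  induction cs generalizing s with
  | nil => simp [pvA_run]
  | cons d ys ih =>
    have hw : pvA_while d s r = (s, r) := by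
      cases s with
      | nil => simp [pvA_while]
      | cons t rest => rw [pvA_while, if_neg (by intro h; omega)]
    have hstep : pvA_run (d :: ys) (s, r) = pvA_run ys (d :: s, r) := by
      simp [pvA_run, pvA_step, hw]
    rw [hstep, ih (d :: s)]
    simp

-- pvB_best returns the leftmost argmax over indices 0..cnt
lemma pvB_best_spec (cs : List Char) (cnt : Nat) :
    pvB_best cs cnt ≤ cnt ∧
      (∀ i, i ≤ cnt → cs.getD i ' ' ≤ cs.getD (pvB_best cs cnt) ' ') ∧
      (∀ i, i < pvB_best cs cnt → cs.getD i ' ' < cs.getD (pvB_best cs cnt) ' ') := by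
  induction cnt with
  | zero => simp [pvB_best]
  | succ n ih =>
    obtain ⟨ih1, ih2, ih3⟩ := ih
    have hfold : pvB_best cs (n + 1) =
        if cs.getD (pvB_best cs n) ' ' < cs.getD (1 + n) ' ' then 1 + n else pvB_best cs n := by
      rw [pvB_best, List.range'_1_concat, List.foldl_append]
      rfl
    by_cases hc : cs.getD (pvB_best cs n) ' ' < cs.getD (1 + n) ' '
    · rw [hfold, if_pos hc]
      refine ⟨by omega, ?_, ?_⟩
      · intro i hi
        rcases Nat.lt_or_ge i (n + 1) with h | h
        · exact le_of_lt (lt_of_le_of_lt (ih2 i (by omega)) hc)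
        · have : i = 1 + n := by omega
          rw [this]
      · intro i hi
        rcases Nat.lt_or_ge i (pvB_best cs n) with h | h
        · exact lt_trans (ih3 i h) hc
        · exact lt_of_le_of_lt (ih2 i (by omega)) hc
    · rw [hfold, if_neg hc]
      refine ⟨by omega, ?_, ih3⟩
      intro i hi
      rcases Nat.lt_or_ge i (n + 1) with h | h
      · exact ih2 i (by omega)
      · have : i = 1 + n := by omega
        rw [this]; exact le_of_not_gt hc

lemma pvB_pick_acc_aux (n : Nat) : ∀ (cs : List Char) (m : Int), m.toNat ≤ n →
    ∀ res, pvB_pick cs m res = res ++ pvB_pick cs m [] := by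
  induction n with
  | zero =>
    intro cs m hn res
    have hm : m ≤ 0 := by omega
    rw [pvB_pick, if_pos hm, pvB_pick, if_pos hm]
    simp
  | succ n ih =>
    intro cs m hn res
    by_cases hm : m ≤ 0
    · rw [pvB_pick, if_pos hm, pvB_pick, if_pos hm]
      simp
    · rw [pvB_pick, if_neg hm]
      conv_rhs => rw [pvB_pick, if_neg hm]
      dsimp only
      rw [ih _ (m - 1) (by omega), ih _ (m - 1) (by omega) ([] ++ _)]
      simp

-- the accumulator of the while loop factors out
lemma pvB_pick_acc (cs : List Char) (m : Int) (res : List Char) :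
    pvB_pick cs m res = res ++ pvB_pick cs m [] :=
  pvB_pick_acc_aux m.toNat cs m le_rfl res

lemma pvB_pick_full (cs : List Char) : pvB_pick cs (cs.length : Int) [] = cs := by
  induction cs with
  | nil => simp [pvB_pick]
  | cons a t ih =>
    rw [pvB_pick, if_neg (by simp)]
    dsimp only
    have h1 : (a :: t).length - ((((a :: t).length : Nat) : Int)).toNat = 0 := by simp
    rw [h1]
    have h2 : pvB_best (a :: t) 0 = 0 := by simp [pvB_best]
    rw [h2]
    simp only [List.getD, List.drop_succ_cons, List.drop_zero]
    have h3 : (((a :: t).length : Nat) : Int) - 1 = ((t.length : Nat) : Int) := by simp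
    rw [h3, pvB_pick_acc, ih]
    simp

-- main equivalence on lists, 0 ≤ budget
lemma pv_main (m : Nat) : ∀ cs : List Char, m ≤ cs.length →
    ((pvA_run cs ([], (cs.length : Int) - m)).1.reverse).take m = pvB_pick cs (m : Int) [] := by
  induction m with
  | zero => intro cs hm; simp [pvB_pick]
  | succ m ih =>
    intro cs hm
    obtain ⟨hb_le, hb_max, hb_left⟩ := pvB_best_spec cs (cs.length - (m + 1))
    set cnt := cs.length - (m + 1) with hcnt
    set bst := pvB_best cs cnt with hbst
    have hbl : bst < cs.length := by omega
    have hdrop : cs.drop bst = cs[bst] :: cs.drop (bst + 1) := List.drop_eq_getElem_cons hbl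
    have hdecomp : cs = (cs.take bst ++ [cs[bst]]) ++ cs.drop (bst + 1) := by
      conv_lhs => rw [← List.take_append_drop bst cs, hdrop]
      simp
    have hpre_len : (cs.take bst).length = bst := by simp; omega
    have hlt : ∀ x ∈ cs.take bst, x < cs[bst] := by
      intro x hx
      obtain ⟨i, hi, hxe⟩ := List.mem_iff_getElem.mp hx
      have hib : i < bst := by omega
      have h := hb_left i hib
      rw [List.getD_eq_getElem cs ' ' (by omega), List.getD_eq_getElem cs ' ' hbl] at h
      rw [← hxe, List.getElem_take]
      exact h
    have hramp := pvA_run_ramp (cs.take bst) cs[bst] ((cs.length : Int) - (m + 1)) hlt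
      (by rw [hpre_len]; omega)
    have hbot := pvA_run_bottom (cs.drop (bst + 1)) [] ((cs.length : Int) - (m + 1) - bst) cs[bst]
      (by
        intro i hi h
        rw [List.getElem_drop]
        have hidx : bst + 1 + i ≤ cnt := by simp at hi; omega
        have h2 := hb_max (bst + 1 + i) hidx
        rw [List.getD_eq_getElem cs ' ' (by omega), List.getD_eq_getElem cs ' ' hbl] at h2
        exact h2)
    simp only [List.nil_append] at hbot
    have hA : pvA_run cs ([], (cs.length : Int) - ((m + 1 : Nat) : Int)) =
        ((pvA_run (cs.drop (bst + 1)) ([], (cs.length : Int) - (m + 1) - bst)).1 ++ [cs[bst]],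
         (pvA_run (cs.drop (bst + 1)) ([], (cs.length : Int) - (m + 1) - bst)).2) := by
      have hlenA : ((cs.take bst ++ [cs[bst]] ++ cs.drop (bst + 1)).length : Int) = (cs.length : Int) := by
        rw [← hdecomp]
      conv_lhs => rw [hdecomp]
      rw [hlenA]
      push_cast
      rw [pvA_run_append, hramp, hpre_len]
      exact hbot
    rw [hA]
    have hIH := ih (cs.drop (bst + 1)) (by simp; omega)
    have hbud : ((cs.drop (bst + 1)).length : Int) - (m : Int) = (cs.length : Int) - (m + 1) - bst := by
      simp; omega
    rw [hbud] at hIH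
    rw [pvB_pick, if_neg (by push_cast; omega)]
    dsimp only
    simp only [Int.toNat_natCast]
    rw [List.getD_eq_getElem cs ' ' hbl]
    have hm1 : ((m + 1 : Nat) : Int) - 1 = (m : Int) := by push_cast; ring
    rw [hm1]
    rw [pvB_pick_acc]
    simp only [List.reverse_append, List.reverse_cons, List.reverse_nil, List.nil_append,
      List.singleton_append, List.take_succ_cons]
    rw [hIH]

-- ===== VERDICT (by name: the statement is the Claim_ definition above) =====
theorem bestSubsequence_spec : Claim_equal_bestSubsequence := by
  intro bank k _ hk
  unfold Pre_bestSubsequence at hk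
  unfold Spec_bestSubsequence bestSubsequence bestSubsequence_alt
  simp only []
  rw [PySem.List.slice_to (hb := hk)]
  congr 1
  by_cases hkl : k ≤ (bank.toList.length : Int)
  · rw [min_eq_left hkl]
    have hmain := pv_main k.toNat bank.toList (by omega)
    have hk2 : ((k.toNat : Nat) : Int) = k := Int.toNat_of_nonneg hk
    rw [hk2] at hmain
    rw [hmain]
  · rw [min_eq_right (by omega : ((bank.toList.length : Nat) : Int) ≤ k)]
    rw [pvA_run_nopop bank.toList [] _ (by omega)]
    simp only [List.append_nil, List.reverse_reverse]
    rw [List.take_of_length_le (by omega), pvB_pick_full]
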